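-- pv_equiv track=rewrite | github.com/pKucinski/zadanie_stepik_5 | main.py | count_duplicate_words
-- ===== SOURCE A (Python) =====
-- def count_duplicate_words(words_list):
--     word_counts = {}
--     for word in words_list:
--         if word in word_counts:
--             word_counts[word] += 1
--         else:
--             word_counts[word] = 1
--
--     duplicate_count = 0
--     for count in word_counts.values():
--         if count > 1:
--             duplicate_count += 1
--
--     return duplicate_count
-- ===== SOURCE B (Python) =====
-- def count_duplicate_words(words_list):
--     seen = set()
--     duplicates = set()
--     for word in words_list:
--         if word in seen:
--             duplicates.add(word)
--         else:
--             seen.add(word)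
--     return len(duplicates)
-- ===== Notes on version B (the rewrite author's own statement) =====
-- stated objective: alternative
-- what changed: Replaces the count-dictionary plus second value-scan with a single pass over the list maintaining two sets (seen, duplicates), detecting duplicates inline by set-membership transition.
import Mathlib
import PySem

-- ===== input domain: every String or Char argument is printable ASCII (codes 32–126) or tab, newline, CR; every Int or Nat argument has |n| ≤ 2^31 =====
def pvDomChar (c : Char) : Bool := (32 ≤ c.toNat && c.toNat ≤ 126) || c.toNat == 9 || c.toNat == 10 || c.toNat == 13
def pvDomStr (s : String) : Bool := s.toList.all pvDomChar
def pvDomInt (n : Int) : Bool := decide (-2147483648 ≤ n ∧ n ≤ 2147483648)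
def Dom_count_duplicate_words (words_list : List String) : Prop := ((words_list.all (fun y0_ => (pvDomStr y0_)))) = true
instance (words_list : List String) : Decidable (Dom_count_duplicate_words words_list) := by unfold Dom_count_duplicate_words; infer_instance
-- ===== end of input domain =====

-- B replaces A's count-dict build plus second value-scan by one pass with two sets (seen/duplicates); alternative decomposition, same cost.

-- ===== PORT A =====
def count_duplicate_words (words_list : List String) : Int :=
  let word_counts : PySem.Dict String Int :=
    words_list.foldl (fun d word =>
      if d.contains word then d.insert word (d.getD word 0 + 1)
      else d.insert word 1) PySem.Dict.empty
  word_counts.values.foldl (fun acc c => if c > 1 then acc + 1 else acc) (0 : Int)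

-- ===== PORT B =====
def count_duplicate_words_alt (words_list : List String) : Int :=
  let p : PySem.Set String × PySem.Set String :=
    words_list.foldl (fun sd word =>
      if PySem.Set.contains sd.1 word then (sd.1, PySem.Set.add sd.2 word)
      else (PySem.Set.add sd.1 word, sd.2)) (PySem.Set.empty, PySem.Set.empty)
  PySem.Set.len p.2

-- ===== PRECONDITION & SPEC =====
def Spec_count_duplicate_words (words_list : List String) (out : Int) : Prop := out = count_duplicate_words_alt words_list
instance (words_list : List String) (out : Int) : Decidable (Spec_count_duplicate_words words_list out) := by unfold Spec_count_duplicate_words; infer_instance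

-- ===== CLAIM (what is proved, stated in full; the proofs are below) =====
def Claim_equal_count_duplicate_words : Prop := ∀ (words_list : List String), Dom_count_duplicate_words words_list → Spec_count_duplicate_words words_list (count_duplicate_words words_list)

-- ===== LEMMAS AND PROOFS =====

theorem pv_getD_zero_of_not_contains (d : PySem.Dict String Int) (w : String)
    (h : ¬ d.contains w = true) : d.getD w 0 = 0 := by
  simp [PySem.Dict.getD]
  cases hq : d.get? w with
  | none => simp
  | some v =>
    exfalso
    have := PySem.Dict.mem_items_of_get?_eq_some _ hq
    simp [PySem.Dict.contains] at h
    exact h v this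

-- A's dict-building step is exactly the Counter step
theorem pv_stepA_eq_counter (d : PySem.Dict String Int) (w : String) :
    (if d.contains w then d.insert w (d.getD w 0 + 1) else d.insert w 1) = d.modify w 0 (· + 1) := by
  by_cases h : d.contains w = true
  · rw [if_pos h]
    simp [PySem.Dict.modify]
  · rw [if_neg h]
    simp [PySem.Dict.modify, pv_getD_zero_of_not_contains d w h]

theorem pv_foldA_eq_counter (l : List String) :
    l.foldl (fun d word =>
      if d.contains word then d.insert word (d.getD word 0 + 1)
      else d.insert word 1) PySem.Dict.empty = PySem.Dict.counter l := by
  rw [PySem.Dict.counter_eq_foldl]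
  simp only [pv_stepA_eq_counter]


-- B's loop invariant: the duplicates set stays Nodup and holds exactly the words
-- already in d, plus those words of l that were already seen (s) or occur twice in l.
theorem pv_B_invariant (l : List String) (s d : List String) (hd : d.Nodup) :
    (l.foldl (fun sd word =>
      if PySem.Set.contains sd.1 word then (sd.1, PySem.Set.add sd.2 word)
      else (PySem.Set.add sd.1 word, sd.2)) (s, d)).2.Nodup ∧
    ∀ w, w ∈ (l.foldl (fun sd word =>
      if PySem.Set.contains sd.1 word then (sd.1, PySem.Set.add sd.2 word)
      else (PySem.Set.add sd.1 word, sd.2)) (s, d)).2 ↔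
      w ∈ d ∨ (w ∈ l ∧ (w ∈ s ∨ 2 ≤ l.count w)) := by
  induction l generalizing s d with
  | nil => simpa using hd
  | cons x t ih =>
    rw [List.foldl_cons]
    by_cases hx : x ∈ s
    · rw [if_pos (by simpa [PySem.Set.contains_iff] using hx)]
      obtain ⟨hn, hm⟩ := ih s (PySem.Set.add d x) (PySem.Set.nodup_add _ _ hd)
      refine ⟨hn, fun w => ?_⟩
      rw [hm w, PySem.Set.mem_add]
      by_cases hw : w = x
      · subst hw
        simp [hx]
      · have hw2 : ¬ x = w := fun h => hw h.symm
        simp [List.mem_cons, hw, hw2]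
    · rw [if_neg (by simpa [PySem.Set.contains_iff] using hx)]
      obtain ⟨hn, hm⟩ := ih (PySem.Set.add s x) d hd
      refine ⟨hn, fun w => ?_⟩
      rw [hm w]
      by_cases hw : w = x
      · subst hw
        constructor
        · rintro (h | ⟨ht, _⟩)
          · exact Or.inl h
          · refine Or.inr ⟨List.mem_cons_self, Or.inr ?_⟩
            have hp : 0 < t.count w := List.count_pos_iff.mpr ht
            rw [List.count_cons_self]
            omega
        · rintro (h | ⟨_, hc⟩)
          · exact Or.inl h
          · rcases hc with h2 | h2
            · exact absurd h2 hx
            · have hmem : w ∈ t := List.count_pos_iff.mp (by rw [List.count_cons_self] at h2; omega)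
              exact Or.inr ⟨hmem, Or.inl (by simp [PySem.Set.mem_add])⟩
      · have hw2 : ¬ x = w := fun h => hw h.symm
        rw [PySem.Set.mem_add]
        simp [List.mem_cons, hw, hw2]

-- the Int-valued counting loop is countP
theorem pv_count_loop (l : List Int) (a : Int) :
    l.foldl (fun acc c => if c > 1 then acc + 1 else acc) a = a + (l.countP (fun c => decide (1 < c)) : Int) := by
  induction l generalizing a with
  | nil => simp
  | cons x t ih =>
    by_cases h : (1 : Int) < x
    · simp only [List.foldl_cons, gt_iff_lt, List.countP_cons, h]
      simp [ih]
      ring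
    · simp only [List.foldl_cons, gt_iff_lt, if_neg h, ih, List.countP_cons]
      simp [h]

-- ===== VERDICT (by name: the statement is the Claim_ definition above) =====
theorem count_duplicate_words_spec : Claim_equal_count_duplicate_words := by
  intro words_list _
  show count_duplicate_words words_list = count_duplicate_words_alt words_list
  unfold count_duplicate_words count_duplicate_words_alt
  rw [pv_foldA_eq_counter, pv_count_loop]
  obtain ⟨hn, hm⟩ := pv_B_invariant words_list PySem.Set.empty PySem.Set.empty List.nodup_nil
  have hvals : (PySem.Dict.counter words_list).values
      = (PySem.Set.ofList words_list).map (fun k => (words_list.count k : Int)) := by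
    show ((PySem.Dict.counter words_list).items.map (·.2)) = _
    rw [PySem.Dict.items_counter]
    simp [List.map_map, Function.comp]
  rw [hvals, List.countP_map]
  have hperm : ((PySem.Set.ofList words_list).filter
      ((fun c => decide ((1:Int) < c)) ∘ fun k => ((words_list.count k : Int)))).Perm
      (words_list.foldl (fun sd word =>
        if PySem.Set.contains sd.1 word then (sd.1, PySem.Set.add sd.2 word)
        else (PySem.Set.add sd.1 word, sd.2)) (PySem.Set.empty, PySem.Set.empty)).2 := by
    apply (List.perm_ext_iff_of_nodup (List.Nodup.filter _ (PySem.Set.nodup_ofList _)) hn).mpr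
    intro w
    rw [List.mem_filter, PySem.Set.mem_ofList, hm w]
    simp only [PySem.Set.empty, Function.comp_apply, decide_eq_true_eq, List.not_mem_nil,
      false_or, Nat.one_lt_cast]
    constructor
    · rintro ⟨hmem, hc⟩
      exact ⟨hmem, by omega⟩
    · rintro ⟨hmem, hc⟩
      exact ⟨hmem, by omega⟩
  simp only [PySem.Set.len, List.countP_eq_length_filter, hperm.length_eq]
  omega
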